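-- pv_equiv track=rewrite | github.com/trekski/test_pwg | _data_processing/bbcode.py | replace_simple_tags
-- ===== SOURCE A (Python) =====
-- def replace_simple_tags(txt, bb_uid):
--     tags = {
--         'u' : 'U',
--         'b' : 'STRONG',
--         'i' : 'EM',
--         's' : 'STRIKE',
--         'sup' : 'SUP',
--         'super' : 'SUP',
--         'sub' : 'SUB',
--         'code' : 'PRE',
--         '*' : 'LI'
--     }
--     for t_before, t_after in  tags.items():
--
--         start_tag_before = f'[{t_before}:{bb_uid}]'
--         start_tag_after = f'<{t_after}>'
--         end_tag_before = f'[/{t_before}:{bb_uid}]'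
--         end_tag_before_m = f'[/{t_before}:m:{bb_uid}]'
--         end_tag_before_u = f'[/{t_before}:u:{bb_uid}]'
--         end_tag_before_o = f'[/{t_before}:o:{bb_uid}]'
--         end_tag_after = f'</{t_after}>'
--
--         txt = txt \
--             .replace(start_tag_before, start_tag_after) \
--             .replace(end_tag_before, end_tag_after) \
--             .replace(end_tag_before_m, end_tag_after) \
--             .replace(end_tag_before_u, end_tag_after) \
--             .replace(end_tag_before_o, end_tag_after)
--
--     return txt
-- ===== SOURCE B (Python) =====
-- def replace_simple_tags(txt, bb_uid):
--     tags = {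
--         'u' : 'U',
--         'b' : 'STRONG',
--         'i' : 'EM',
--         's' : 'STRIKE',
--         'sup' : 'SUP',
--         'super' : 'SUP',
--         'sub' : 'SUB',
--         'code' : 'PRE',
--         '*' : 'LI'
--     }
--     # one token table: every literal BBCode token -> its HTML output
--     tokens = {}
--     for t, h in tags.items():
--         tokens[f'[{t}:{bb_uid}]'] = f'<{h}>'
--         for mid in ('', 'm:', 'u:', 'o:'):
--             tokens[f'[/{t}:{mid}{bb_uid}]'] = f'</{h}>'
--     out = []
--     i = 0
--     n = len(txt)
--     while i < n:
--         c = txt[i]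
--         if c == '[':
--             for pat, rep in tokens.items():
--                 if txt.startswith(pat, i):
--                     out.append(rep)
--                     i += len(pat)
--                     break
--             else:
--                 out.append(c)
--                 i += 1
--         else:
--             out.append(c)
--             i += 1
--     return ''.join(out)
-- ===== Notes on version B (the rewrite author's own statement) =====
-- stated objective: alternative
-- what changed: A makes 45 sequential str.replace passes over the whole text (5 per tag); B precomputes one dict mapping every literal BBCode token to its HTML output and rewrites the text in a single left-to-right scan, looking tokens up only at '[' characters.
-- outside the precondition, e.g. on replace_simple_tags('[b:[u:<U>x]x]', '<U>x'): A returns '<STRONG>', B returns '[b:<U>x]'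
import Mathlib
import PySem

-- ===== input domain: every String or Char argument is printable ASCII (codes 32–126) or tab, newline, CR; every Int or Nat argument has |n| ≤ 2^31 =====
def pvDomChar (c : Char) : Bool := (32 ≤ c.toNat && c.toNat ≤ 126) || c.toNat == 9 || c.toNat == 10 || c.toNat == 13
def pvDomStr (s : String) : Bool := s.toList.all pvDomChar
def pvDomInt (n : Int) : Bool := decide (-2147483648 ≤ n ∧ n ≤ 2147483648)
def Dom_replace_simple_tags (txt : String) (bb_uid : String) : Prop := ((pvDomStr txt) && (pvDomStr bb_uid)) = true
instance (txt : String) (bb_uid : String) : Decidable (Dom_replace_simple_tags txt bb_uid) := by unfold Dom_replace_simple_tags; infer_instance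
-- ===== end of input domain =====

-- B replaces A's 45 sequential str.replace passes by one token table and a single
-- left-to-right scan of the text (objective: alternative algorithm, not timed faster).

-- ===== PORT A =====
-- loop body of A's `for t_before, t_after in tags.items()` (the five chained replaces)
def pvBodyA (bb_uid : String) (txt : String) (p : String × String) : String :=
  let start_tag_before := "[" ++ p.1 ++ ":" ++ bb_uid ++ "]"
  let start_tag_after  := "<" ++ p.2 ++ ">"
  let end_tag_before   := "[/" ++ p.1 ++ ":" ++ bb_uid ++ "]"
  let end_tag_before_m := "[/" ++ p.1 ++ ":m:" ++ bb_uid ++ "]"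
  let end_tag_before_u := "[/" ++ p.1 ++ ":u:" ++ bb_uid ++ "]"
  let end_tag_before_o := "[/" ++ p.1 ++ ":o:" ++ bb_uid ++ "]"
  let end_tag_after    := "</" ++ p.2 ++ ">"
  PySem.Str.replace
    (PySem.Str.replace
      (PySem.Str.replace
        (PySem.Str.replace
          (PySem.Str.replace txt start_tag_before start_tag_after)
          end_tag_before end_tag_after)
        end_tag_before_m end_tag_after)
      end_tag_before_u end_tag_after)
    end_tag_before_o end_tag_after

def replace_simple_tags (txt : String) (bb_uid : String) : String :=
  let tags : List (String × String) :=
    [("u", "U"), ("b", "STRONG"), ("i", "EM"), ("s", "STRIKE"), ("sup", "SUP"),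
     ("super", "SUP"), ("sub", "SUB"), ("code", "PRE"), ("*", "LI")]
  tags.foldl (pvBodyA bb_uid) txt

-- ===== PORT B =====
def pvTags : List (String × String) :=
  [("u", "U"), ("b", "STRONG"), ("i", "EM"), ("s", "STRIKE"), ("sup", "SUP"),
   ("super", "SUP"), ("sub", "SUB"), ("code", "PRE"), ("*", "LI")]

-- Source B's while-loop: at each position try the token table (only at '['), else copy the char
def pvScan (tokens : List (List Char × List Char)) : List Char → List Char
  | [] => []
  | c :: t =>
    if c = '[' then
      match tokens.find? (fun pr => pr.1.isPrefixOf (c :: t)) with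
      | some pr => pr.2 ++ pvScan tokens (t.drop (pr.1.length - 1))
      | none => c :: pvScan tokens t
    else c :: pvScan tokens t
termination_by s => s.length
decreasing_by all_goals simp

def replace_simple_tags_alt (txt : String) (bb_uid : String) : String :=
  let tokens : List (String × String) :=
    pvTags.foldl (fun tokens p =>
      let tokens := tokens ++ [("[" ++ p.1 ++ ":" ++ bb_uid ++ "]", "<" ++ p.2 ++ ">")]
      ["", "m:", "u:", "o:"].foldl (fun tokens mid =>
        tokens ++ [("[/" ++ p.1 ++ ":" ++ mid ++ bb_uid ++ "]", "</" ++ p.2 ++ ">")]) tokens) []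
  String.ofList (pvScan (tokens.map (fun pr => (pr.1.toList, pr.2.toList))) txt.toList)

-- ===== PRECONDITION & SPEC =====
-- Pre_ excludes bb_uid containing '[', ']' or '<': there the 45 sequential replace passes of A
-- can interact (one pass's output or a longer tag can contain a later pass's pattern), so the
-- result is an accident of A's pass order that a single scan need not reproduce.
def Pre_replace_simple_tags (txt : String) (bb_uid : String) : Prop :=
  '[' ∉ bb_uid.toList ∧ ']' ∉ bb_uid.toList ∧ '<' ∉ bb_uid.toList
instance (txt : String) (bb_uid : String) : Decidable (Pre_replace_simple_tags txt bb_uid) := by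
  unfold Pre_replace_simple_tags; infer_instance

def pvWitness_replace_simple_tags : String × String := ("[b:x] ok [/b:x]", "x")

def Spec_replace_simple_tags (txt : String) (bb_uid : String) (out : String) : Prop :=
  out = replace_simple_tags_alt txt bb_uid
instance (txt : String) (bb_uid : String) (out : String) : Decidable (Spec_replace_simple_tags txt bb_uid out) := by
  unfold Spec_replace_simple_tags; infer_instance

-- ===== CLAIM (what is proved, stated in full; the proofs are below) =====
def Claim_equal_replace_simple_tags : Prop := ∀ (txt : String) (bb_uid : String), Dom_replace_simple_tags txt bb_uid → Pre_replace_simple_tags txt bb_uid → Spec_replace_simple_tags txt bb_uid (replace_simple_tags txt bb_uid)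

-- ===== LEMMAS AND PROOFS =====

-- one-pattern left-to-right replacement (structural form of PySem.Chars.replace for a nonempty pattern)
def pvRepl (p r : List Char) : List Char → List Char
  | [] => []
  | c :: t => if p.isPrefixOf (c :: t) then r ++ pvRepl p r (t.drop (p.length - 1)) else c :: pvRepl p r t
termination_by s => s.length
decreasing_by all_goals simp

lemma pvRepl_nil (p r : List Char) : pvRepl p r [] = [] := by rw [pvRepl]

lemma pvRepl_cons_pos (p r : List Char) (c : Char) (t : List Char) (h : p.isPrefixOf (c :: t)) :
    pvRepl p r (c :: t) = r ++ pvRepl p r (t.drop (p.length - 1)) := by rw [pvRepl]; simp [h]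

lemma pvRepl_cons_neg (p r : List Char) (c : Char) (t : List Char) (h : ¬ p.isPrefixOf (c :: t)) :
    pvRepl p r (c :: t) = c :: pvRepl p r t := by rw [pvRepl]; simp [h]

lemma pvGo_eq (p r : List Char) (hp : p ≠ []) (fuel : Nat) :
    ∀ (l acc : List Char), l.length ≤ fuel →
    PySem.Chars.replace.go p r fuel l acc = acc.reverse ++ pvRepl p r l := by
  induction fuel with
  | zero =>
    intro l acc hf
    have : l = [] := by cases l <;> simp_all
    subst this
    simp [PySem.Chars.replace.go, pvRepl_nil]
  | succ n ih =>
    intro l acc hf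
    cases l with
    | nil => simp [PySem.Chars.replace.go, pvRepl_nil]
    | cons c t =>
      rw [PySem.Chars.replace.go]
      by_cases h : p.isPrefixOf (c :: t)
      · have hd : List.drop p.length (c :: t) = List.drop (p.length - 1) t := by
          cases p with
          | nil => exact absurd rfl hp
          | cons a q => simp
        simp only [h, if_true, hd]
        rw [ih (List.drop (p.length - 1) t) (r.reverse ++ acc) (by simp at hf ⊢; omega)]
        rw [pvRepl_cons_pos p r c t h]
        simp
      · simp only [h]
        rw [ih t (c :: acc) (by simp at hf ⊢; omega)]
        rw [pvRepl_cons_neg p r c t h]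
        simp

lemma pvToList_replace (s old new : String) (h : old.toList ≠ []) :
    (PySem.Str.replace s old new).toList = pvRepl old.toList new.toList s.toList := by
  rw [PySem.Str.replace, PySem.Chars.replace]
  have hemp : old.toList.isEmpty = false := by simp_all
  rw [hemp]
  simp only [Bool.false_eq_true, if_false]
  rw [pvGo_eq old.toList new.toList h s.toList.length s.toList [] (le_refl _)]
  simp

-- the sequential chain of replacements (the A side, on lists)
def pvChain (toks : List (List Char × List Char)) (s : List Char) : List Char :=
  toks.foldl (fun s pr => pvRepl pr.1 pr.2 s) s

lemma pvChain_nil_s (toks : List (List Char × List Char)) : pvChain toks [] = [] := by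
  induction toks with
  | nil => rfl
  | cons pr rest ih => simp [pvChain, List.foldl] at ih ⊢; rw [pvRepl_nil]; exact ih

lemma pvChain_cons (pr : List Char × List Char) (toks : List (List Char × List Char)) (s : List Char) :
    pvChain (pr :: toks) s = pvChain toks (pvRepl pr.1 pr.2 s) := rfl

lemma pvChain_append (xs ys : List (List Char × List Char)) (s : List Char) :
    pvChain (xs ++ ys) s = pvChain ys (pvChain xs s) := by
  simp [pvChain, List.foldl_append]

-- shape of every token: pattern starts with its only '[', replacement starts with '<' and has no '['
def pvShape (pr : List Char × List Char) : Prop :=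
  pr.1 ≠ [] ∧ pr.1.head? = some '[' ∧ '[' ∉ pr.1.tail ∧ '<' ∉ pr.1 ∧
  pr.2 ≠ [] ∧ pr.2.head? = some '<' ∧ '[' ∉ pr.2

-- no '<'-free word becomes a prefix of pvRepl's output unless it already was one (no match creation)
lemma pvRepl_pref (p r : List Char) (hp : p ≠ []) (hr : r.head? = some '<') :
    ∀ s w, '<' ∉ w → w <+: pvRepl p r s → w <+: s := by
  intro s
  induction s using pvRepl.induct p with
  | case1 =>
    intro w _ hw
    rw [pvRepl_nil] at hw
    simpa using hw
  | case2 c t hm ih =>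
    intro w hwlt hw
    rw [pvRepl_cons_pos p r c t hm] at hw
    cases w with
    | nil => exact List.nil_prefix
    | cons d w' =>
      obtain ⟨r', hr'⟩ : ∃ r', r = '<' :: r' := by
        cases r with
        | nil => simp at hr
        | cons a r' => simp at hr; exact ⟨r', by rw [hr]⟩
      rw [hr'] at hw
      have : d = '<' := (List.cons_prefix_cons.mp hw).1
      exact absurd (this ▸ List.mem_cons_self) hwlt
  | case3 c t hm ih =>
    intro w hwlt hw
    rw [pvRepl_cons_neg p r c t hm] at hw
    cases w with
    | nil => exact List.nil_prefix
    | cons d w' =>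
      obtain ⟨hd, hw'⟩ := List.cons_prefix_cons.mp hw
      have : w' <+: t := ih w' (fun h => hwlt (List.mem_cons_of_mem _ h)) hw'
      exact hd ▸ List.cons_prefix_cons.mpr ⟨rfl, this⟩

-- a block w with no interior '[' and no match at its start is copied verbatim
lemma pvRepl_split (p r : List Char) (hph : p.head? = some '[') :
    ∀ w s, w ≠ [] → '[' ∉ w.tail → ¬ p <+: (w ++ s) →
    pvRepl p r (w ++ s) = w ++ pvRepl p r s := by
  intro w
  induction w with
  | nil => intro s h; exact absurd rfl h
  | cons a w' ih =>
    intro s _ htl hnp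
    have hnpre : ¬ p.isPrefixOf (a :: (w' ++ s)) := by
      intro h
      exact hnp (by simpa using List.isPrefixOf_iff_prefix.mp h)
    rw [show (a :: w') ++ s = a :: (w' ++ s) from rfl, pvRepl_cons_neg p r _ _ hnpre]
    cases hw' : w' with
    | nil => simp
    | cons b w'' =>
      rw [← hw']
      have hb : b ≠ '[' := by
        intro h
        exact htl (by simp [hw', h])
      have : ¬ p <+: (w' ++ s) := by
        intro h
        have hpne : p ≠ [] := by intro h0; rw [h0] at hph; simp at hph
        have : p.head? = (w' ++ s).head? := by
          obtain ⟨t, ht⟩ := h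
          cases p with
          | nil => exact absurd rfl hpne
          | cons x xs => rw [← ht]; rfl
        rw [hph, hw'] at this
        simp at this
        exact hb this.symm
      rw [ih s (by simp [hw']) (by intro h; exact htl (by simp [hw']; right; simpa [hw'] using h)) this]
      simp

lemma pvRepl_match (p r : List Char) (hp : p ≠ []) (s : List Char) :
    pvRepl p r (p ++ s) = r ++ pvRepl p r s := by
  cases hp' : p with
  | nil => exact absurd hp' hp
  | cons c q =>
    rw [← hp']
    have h1 : p ++ s = c :: (q ++ s) := by rw [hp']; rfl
    have h2 : p.isPrefixOf (c :: (q ++ s)) := by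
      rw [List.isPrefixOf_iff_prefix, ← h1]; exact List.prefix_append p s
    rw [h1, pvRepl_cons_pos p r c (q ++ s) h2]
    have : p.length - 1 = q.length := by rw [hp']; simp
    rw [this, List.drop_left]

-- the chain copies a '['-free nonempty block verbatim
lemma pvChain_skip_rep (toks : List (List Char × List Char))
    (hs : ∀ pr ∈ toks, pvShape pr) (w : List Char) (hw : w ≠ []) (hwl : '[' ∉ w) :
    ∀ s, pvChain toks (w ++ s) = w ++ pvChain toks s := by
  induction toks with
  | nil => intro s; rfl
  | cons pr rest ih =>
    intro s
    obtain ⟨hp, hph, _, _, _, _, _⟩ := hs pr List.mem_cons_self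
    have hnp : ¬ pr.1 <+: (w ++ s) := by
      intro h
      have : pr.1.head? = (w ++ s).head? := by
        obtain ⟨t, ht⟩ := h
        cases hpp : pr.1 with
        | nil => exact absurd hpp hp
        | cons x xs => rw [← ht, hpp]; rfl
      rw [hph] at this
      cases w with
      | nil => exact hw rfl
      | cons a w' => simp at this; exact hwl (by simp [← this])
    rw [pvChain_cons, pvRepl_split pr.1 pr.2 hph w s hw
      (fun h => hwl (List.mem_of_mem_tail h)) hnp,
      ih (fun x hx => hs x (List.mem_cons_of_mem _ hx)) (pvRepl pr.1 pr.2 s), pvChain_cons]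

-- the chain copies a full pattern verbatim when no token's pattern is a prefix of it or extends it
lemma pvChain_skip_pat (toks : List (List Char × List Char))
    (hs : ∀ pr ∈ toks, pvShape pr) (pat : List Char)
    (hpat : pat ≠ []) (hph : pat.head? = some '[') (htl : '[' ∉ pat.tail)
    (hnp : ∀ pr ∈ toks, ¬ pr.1 <+: pat ∧ ¬ pat <+: pr.1) :
    ∀ s, pvChain toks (pat ++ s) = pat ++ pvChain toks s := by
  induction toks with
  | nil => intro s; rfl
  | cons pr rest ih =>
    intro s
    have hnpre : ¬ pr.1 <+: (pat ++ s) := by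
      intro h
      obtain ⟨h1, h2⟩ := hnp pr List.mem_cons_self
      rcases Nat.lt_or_ge pat.length pr.1.length with hlt | hge
      · exact h2 (List.prefix_of_prefix_length_le (List.prefix_append pat s) h (le_of_lt hlt))
      · exact h1 (List.prefix_of_prefix_length_le h (List.prefix_append pat s) hge)
    rw [pvChain_cons, pvRepl_split pr.1 pr.2 ((hs pr List.mem_cons_self).2.1) pat s hpat htl hnpre,
      ih (fun x hx => hs x (List.mem_cons_of_mem _ hx))
         (fun x hx => hnp x (List.mem_cons_of_mem _ hx)) (pvRepl pr.1 pr.2 s), pvChain_cons]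

-- when no token matches at the head, the chain copies the head char
lemma pvChain_cons_nomatch (toks : List (List Char × List Char))
    (hs : ∀ pr ∈ toks, pvShape pr) (c : Char) :
    ∀ t, (∀ pr ∈ toks, ¬ pr.1 <+: (c :: t)) →
    pvChain toks (c :: t) = c :: pvChain toks t := by
  induction toks with
  | nil => intro t _; rfl
  | cons pr rest ih =>
    intro t hnm
    obtain ⟨hp, _, _, _, _, hrh, _⟩ := hs pr List.mem_cons_self
    have hnpre : ¬ pr.1.isPrefixOf (c :: t) := by
      intro h
      exact hnm pr List.mem_cons_self (List.isPrefixOf_iff_prefix.mp h)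
    rw [pvChain_cons, pvRepl_cons_neg pr.1 pr.2 c t hnpre]
    apply ih (fun x hx => hs x (List.mem_cons_of_mem _ hx))
    intro qr hqr hq
    cases hqq : qr.1 with
    | nil =>
      exact hnm qr (List.mem_cons_of_mem _ hqr) (by rw [hqq]; exact List.nil_prefix)
    | cons d q' =>
      rw [hqq] at hq
      obtain ⟨hd, hq'⟩ := List.cons_prefix_cons.mp hq
      obtain ⟨hqp, _, _, hqlt, _, _, _⟩ := hs qr (List.mem_cons_of_mem _ hqr)
      have : q' <+: t :=
        pvRepl_pref pr.1 pr.2 hp hrh t q'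
          (fun h => hqlt (by rw [hqq]; exact List.mem_cons_of_mem _ h)) hq'
      exact hnm qr (List.mem_cons_of_mem _ hqr) (by rw [hqq, hd]; exact List.cons_prefix_cons.mpr ⟨rfl, this⟩)

-- distinct tokens of the table are never prefixes of one another (bb_uid free of '[' ']')
lemma pvTok_nonprefix (a1 a2 u : List Char) (hu : ']' ∉ u) (ha2 : ']' ∉ a2)
    (hne : a1 ++ u ++ [']'] ≠ a2 ++ u ++ [']']) :
    ¬ (a1 ++ u ++ [']'] <+: a2 ++ u ++ [']']) := by
  intro h
  rcases Nat.lt_or_ge ((a2 ++ u).length) ((a1 ++ u ++ [']']).length) with hlt | hle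
  · have hlen : (a2 ++ u ++ [']']).length ≤ (a1 ++ u ++ [']']).length := by simp at hlt ⊢; omega
    exact hne (h.eq_of_length_le hlen)
  · have h2 : a1 ++ u ++ [']'] <+: a2 ++ u := by
      have : a2 ++ u ++ [']'] = (a2 ++ u) ++ [']'] := by simp
      rw [this] at h
      exact List.prefix_of_prefix_length_le h (List.prefix_append _ _) hle
    have : ']' ∈ a2 ++ u := h2.subset (by simp)
    simp at this
    rcases this with h' | h'
    · exact ha2 h'
    · exact hu h'

-- the 45 tokens, built per tag exactly as both programs build them
def pvFive (t h u : List Char) : List (List Char × List Char) :=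
  [(('[' :: (t ++ [':'])) ++ u ++ [']'], '<' :: (h ++ ['>'])),
   (('[' :: '/' :: (t ++ [':'])) ++ u ++ [']'], '<' :: '/' :: (h ++ ['>'])),
   (('[' :: '/' :: (t ++ [':', 'm', ':'])) ++ u ++ [']'], '<' :: '/' :: (h ++ ['>'])),
   (('[' :: '/' :: (t ++ [':', 'u', ':'])) ++ u ++ [']'], '<' :: '/' :: (h ++ ['>'])),
   (('[' :: '/' :: (t ++ [':', 'o', ':'])) ++ u ++ [']'], '<' :: '/' :: (h ++ ['>']))]

def pvMk (u : List Char) : List (List Char × List Char) :=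
  pvTags.flatMap (fun p => pvFive p.1.toList p.2.toList u)

-- the fixed parts ("pres") of the 45 patterns
def pvPres : List (List Char) :=
  pvTags.flatMap (fun p =>
    [('[' :: (p.1.toList ++ [':'])),
     ('[' :: '/' :: (p.1.toList ++ [':'])),
     ('[' :: '/' :: (p.1.toList ++ [':', 'm', ':'])),
     ('[' :: '/' :: (p.1.toList ++ [':', 'u', ':'])),
     ('[' :: '/' :: (p.1.toList ++ [':', 'o', ':']))])

lemma pvMk_fst (u : List Char) : (pvMk u).map (·.1) = pvPres.map (· ++ u ++ [']']) := by
  simp [pvMk, pvPres, pvTags, pvFive]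

lemma pvPres_nodup : pvPres.Nodup := by decide

lemma pvMk_form (u : List Char) :
    ∀ pr ∈ pvMk u, ∃ a ∈ pvPres, pr.1 = a ++ u ++ [']'] ∧ ']' ∉ a := by
  intro pr hpr
  rw [pvMk, List.mem_flatMap] at hpr
  obtain ⟨p, hp, hmem⟩ := hpr
  have hchars : ']' ∉ p.1.toList := by
    revert hp
    have : ∀ q ∈ pvTags, ']' ∉ q.1.toList := by decide
    exact fun hp => this p hp
  rw [pvFive] at hmem
  rw [pvPres]
  fin_cases hmem <;>
    exact ⟨_, List.mem_flatMap.mpr ⟨p, hp, by simp⟩, rfl, by simp [hchars]⟩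

lemma pvMk_shape (u : List Char) (hu1 : '[' ∉ u) (hu3 : '<' ∉ u) :
    ∀ pr ∈ pvMk u, pvShape pr := by
  intro pr hpr
  rw [pvMk, List.mem_flatMap] at hpr
  obtain ⟨p, hp, hmem⟩ := hpr
  have hchars : '[' ∉ p.1.toList ∧ '<' ∉ p.1.toList ∧ '[' ∉ p.2.toList := by
    revert hp
    have : ∀ q ∈ pvTags, '[' ∉ q.1.toList ∧ '<' ∉ q.1.toList ∧ '[' ∉ q.2.toList := by decide
    exact fun hp => this p hp
  obtain ⟨ht1, ht3, hh1⟩ := hchars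
  rw [pvFive] at hmem
  fin_cases hmem <;>
    exact ⟨by simp, by simp, by simp [ht1, hu1], by simp [ht3, hu3], by simp, by simp, by simp [hh1]⟩

lemma pvMk_nodup_fst (u : List Char) (hu2 : ']' ∉ u) : ((pvMk u).map (·.1)).Nodup := by
  rw [pvMk_fst]
  apply List.Nodup.map _ pvPres_nodup
  intro a b hab
  have : (a ++ u) ++ [']'] = (b ++ u) ++ [']'] := by simpa using hab
  have := List.append_cancel_right this
  exact List.append_cancel_right this

-- the scan's step equations
lemma pvScan_nil (toks : List (List Char × List Char)) : pvScan toks [] = [] := by rw [pvScan]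

lemma pvScan_cons_none (toks : List (List Char × List Char)) (c : Char) (t : List Char)
    (h : toks.find? (fun pr => pr.1.isPrefixOf (c :: t)) = none) :
    pvScan toks (c :: t) = c :: pvScan toks t := by
  rw [pvScan]
  by_cases hc : c = '['
  · subst hc
    rw [if_pos rfl, h]
  · simp [hc]

lemma pvScan_cons_some (toks : List (List Char × List Char)) (c : Char) (t : List Char)
    (pr : List Char × List Char) (hc : c = '[')
    (h : toks.find? (fun pr => pr.1.isPrefixOf (c :: t)) = some pr) :
    pvScan toks (c :: t) = pr.2 ++ pvScan toks (t.drop (pr.1.length - 1)) := by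
  subst hc
  rw [pvScan]
  rw [if_pos rfl, h]

-- the chain consumes a matched token exactly like the scan does
lemma pvChain_match (u : List Char) (hu1 : '[' ∉ u) (hu2 : ']' ∉ u) (hu3 : '<' ∉ u)
    (pr : List Char × List Char) (hpr : pr ∈ pvMk u) (rest : List Char) :
    pvChain (pvMk u) (pr.1 ++ rest) = pr.2 ++ pvChain (pvMk u) rest := by
  obtain ⟨before, after, hsplit⟩ := List.mem_iff_append.mp hpr
  have hshape := pvMk_shape u hu1 hu3
  obtain ⟨hp, hph, htl, hplt, hrp, hrh, hrl⟩ := hshape pr hpr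
  have hnodup := pvMk_nodup_fst u hu2
  have hform := pvMk_form u
  -- every other token's pattern is unrelated to pr.1 by prefix
  have hunrel : ∀ x ∈ pvMk u, x.1 ≠ pr.1 → ¬ x.1 <+: pr.1 ∧ ¬ pr.1 <+: x.1 := by
    intro x hx hne
    obtain ⟨a1, _, hx1, ha1⟩ := hform x hx
    obtain ⟨a2, _, hp1, ha2⟩ := hform pr hpr
    constructor
    · rw [hx1, hp1]
      exact pvTok_nonprefix a1 a2 u hu2 ha2 (by rw [← hx1, ← hp1]; exact hne)
    · rw [hx1, hp1]
      exact pvTok_nonprefix a2 a1 u hu2 ha1 (by rw [← hx1, ← hp1]; exact fun h => hne h.symm)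
  -- patterns in before/after differ from pr.1
  have hne_of_side : ∀ x ∈ before ++ after, x.1 ≠ pr.1 := by
    have h1 : ((before ++ pr :: after).map (·.1)).Nodup := by rw [← hsplit]; exact hnodup
    intro x hx hx1
    rw [List.map_append, List.map_cons] at h1
    have := (List.nodup_cons.mp (List.nodup_middle.mp h1)).1
    rw [List.mem_append] at hx
    rcases hx with hx | hx
    · exact this (by rw [List.mem_append]; left; exact List.mem_map.mpr ⟨x, hx, hx1⟩)
    · exact this (by rw [List.mem_append]; right; exact List.mem_map.mpr ⟨x, hx, hx1⟩)
  have hmemside : ∀ x ∈ before ++ after, x ∈ pvMk u := by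
    intro x hx
    rw [hsplit]
    rw [List.mem_append] at hx ⊢
    rcases hx with hx | hx
    · left; exact hx
    · right; exact List.mem_cons_of_mem _ hx
  have hsb : ∀ x ∈ before, pvShape x := fun x hx => hshape x (hmemside x (by simp [hx]))
  have hsa : ∀ x ∈ after, pvShape x := fun x hx => hshape x (hmemside x (by simp [hx]))
  calc pvChain (pvMk u) (pr.1 ++ rest)
      = pvChain (pr :: after) (pvChain before (pr.1 ++ rest)) := by
        rw [hsplit, pvChain_append]
    _ = pvChain (pr :: after) (pr.1 ++ pvChain before rest) := by
        rw [pvChain_skip_pat before hsb pr.1 hp hph htl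
          (fun x hx => hunrel x (hmemside x (by simp [hx])) (hne_of_side x (by simp [hx]))) rest]
    _ = pvChain after (pvRepl pr.1 pr.2 (pr.1 ++ pvChain before rest)) := by rw [pvChain_cons]
    _ = pvChain after (pr.2 ++ pvRepl pr.1 pr.2 (pvChain before rest)) := by
        rw [pvRepl_match pr.1 pr.2 hp]
    _ = pr.2 ++ pvChain after (pvRepl pr.1 pr.2 (pvChain before rest)) := by
        rw [pvChain_skip_rep after hsa pr.2 hrp hrl]
    _ = pr.2 ++ pvChain (pvMk u) rest := by
        rw [hsplit, show before ++ pr :: after = (before ++ [pr]) ++ after from by simp,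
          pvChain_append, pvChain_append, pvChain_cons]
        rfl

-- the main equivalence on lists: sequential chain = single scan
lemma pvChain_eq_scan (u : List Char) (hu1 : '[' ∉ u) (hu2 : ']' ∉ u) (hu3 : '<' ∉ u) :
    ∀ s, pvChain (pvMk u) s = pvScan (pvMk u) s := by
  have main : ∀ n s, s.length ≤ n → pvChain (pvMk u) s = pvScan (pvMk u) s := by
    intro n
    induction n with
    | zero =>
      intro s hs
      have : s = [] := by cases s <;> simp_all
      rw [this, pvChain_nil_s, pvScan_nil]
    | succ n ih =>
      intro s hs
      cases hfind : (pvMk u).find? (fun pr => pr.1.isPrefixOf s) with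
      | none =>
        have hnm : ∀ pr ∈ pvMk u, ¬ pr.1 <+: s := by
          intro pr hpr h
          have := List.find?_eq_none.mp hfind pr hpr
          simp [List.isPrefixOf_iff_prefix] at this
          exact this h
        cases s with
        | nil => rw [pvChain_nil_s, pvScan_nil]
        | cons c t =>
          rw [pvChain_cons_nomatch (pvMk u) (pvMk_shape u hu1 hu3) c t (fun pr hpr => hnm pr hpr),
            pvScan_cons_none (pvMk u) c t hfind, ih t (by simp at hs; omega)]
      | some pr =>
        have hpr : pr ∈ pvMk u := List.mem_of_find?_eq_some hfind
        have hmatch : pr.1 <+: s := by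
          have := List.find?_some hfind
          simpa [List.isPrefixOf_iff_prefix] using this
        obtain ⟨hp, hph, _, _, _, _, _⟩ := pvMk_shape u hu1 hu3 pr hpr
        obtain ⟨rest, hrest⟩ := hmatch
        cases hs' : s with
        | nil =>
          rw [hs'] at hrest
          have : pr.1 = [] := by
            cases hpp : pr.1 with
            | nil => rfl
            | cons x xs => rw [hpp] at hrest; simp at hrest
          exact absurd this hp
        | cons c t =>
          have hc : c = '[' := by
            have : pr.1.head? = s.head? := by
              cases hpp : pr.1 with
              | nil => exact absurd hpp hp
              | cons x xs => rw [← hrest, hpp]; rfl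
            rw [hph, hs'] at this
            simp at this
            exact this.symm
          rw [← hs']
          have hdrop : t.drop (pr.1.length - 1) = rest := by
            have h1 : s.drop pr.1.length = rest := by rw [← hrest, List.drop_left]
            have h2 : pr.1.length - 1 + 1 = pr.1.length := by
              cases hpp : pr.1 with
              | nil => exact absurd hpp hp
              | cons x xs => simp
            rw [hs'] at h1
            rw [← h1, ← h2, List.drop_succ_cons, h2]
          rw [← hrest, pvChain_match u hu1 hu2 hu3 pr hpr rest, hrest, hs',
            pvScan_cons_some (pvMk u) c t pr hc (by rw [← hs']; exact hfind), hdrop]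
          congr 1
          rw [← hrest] at hs'
          have hlen : rest.length ≤ n := by
            have : pr.1.length ≥ 1 := by
              cases hpp : pr.1 with
              | nil => exact absurd hpp hp
              | cons x xs => simp
            rw [← hrest] at hs
            simp at hs
            omega
          rw [ih rest hlen]
  intro s
  exact main s.length s (le_refl _)

-- the A port computes the chain
lemma pvBodyA_toList (uid t h txt : String) :
    (pvBodyA uid txt (t, h)).toList = pvChain (pvFive t.toList h.toList uid.toList) txt.toList := by
  have ne1 : ("[" ++ t ++ ":" ++ uid ++ "]").toList ≠ [] := by simp
  have ne2 : ("[/" ++ t ++ ":" ++ uid ++ "]").toList ≠ [] := by simp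
  have ne3 : ("[/" ++ t ++ ":m:" ++ uid ++ "]").toList ≠ [] := by simp
  have ne4 : ("[/" ++ t ++ ":u:" ++ uid ++ "]").toList ≠ [] := by simp
  have ne5 : ("[/" ++ t ++ ":o:" ++ uid ++ "]").toList ≠ [] := by simp
  rw [pvBodyA]
  rw [pvToList_replace _ _ _ ne5, pvToList_replace _ _ _ ne4, pvToList_replace _ _ _ ne3,
    pvToList_replace _ _ _ ne2, pvToList_replace _ _ _ ne1]
  simp only [pvFive, pvChain, List.foldl]
  simp

lemma pvFold_toList (uid : String) :
    ∀ (tags : List (String × String)) (txt : String),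
    (tags.foldl (pvBodyA uid) txt).toList =
      pvChain (tags.flatMap (fun p => pvFive p.1.toList p.2.toList uid.toList)) txt.toList := by
  intro tags
  induction tags with
  | nil => intro txt; simp [pvChain]
  | cons p rest ih =>
    intro txt
    rw [List.foldl_cons, ih (pvBodyA uid txt p), List.flatMap_cons, pvChain_append]
    congr 1
    cases p with
    | mk t h => exact pvBodyA_toList uid t h txt

lemma pvA_eq (txt uid : String) :
    (replace_simple_tags txt uid).toList = pvChain (pvMk uid.toList) txt.toList := by
  rw [replace_simple_tags]
  exact pvFold_toList uid _ txt

lemma pvB_eq (txt uid : String) :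
    (replace_simple_tags_alt txt uid).toList = pvScan (pvMk uid.toList) txt.toList := by
  rw [replace_simple_tags_alt]
  simp only [pvTags, List.foldl]
  simp [pvMk, pvFive, pvTags]

-- ===== VERDICT (by name: the statement is the Claim_ definition above) =====
theorem replace_simple_tags_spec : Claim_equal_replace_simple_tags := by
  intro txt uid _ hpre
  obtain ⟨hu1, hu2, hu3⟩ := hpre
  unfold Spec_replace_simple_tags
  apply String.toList_inj.mp
  rw [pvA_eq, pvB_eq, pvChain_eq_scan uid.toList hu1 hu2 hu3]
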